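-- pv_equiv track=rewrite | github.com/YourWisemaker/n8n-templates | check_spacing.py | find_close_nodes
-- ===== SOURCE A (Python) =====
-- MIN_HORIZONTAL = 240
--
-- MIN_VERTICAL = 200
--
-- def find_close_nodes(all_positions):
--     issues = []
--
--     # Group by file
--     files = {}
--     for pos in all_positions:
--         file_path = pos[3]
--         if file_path not in files:
--             files[file_path] = []
--         files[file_path].append(pos)
--
--     for file_path, positions in files.items():
--         for i, (x1, y1, name1, _) in enumerate(positions):
--             for j, (x2, y2, name2, _) in enumerate(positions[i+1:], i+1):
--                 dx = abs(x2 - x1)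
--                 dy = abs(y2 - y1)
--
--                 # Check if nodes are too close horizontally or vertically
--                 too_close_horizontal = dx < MIN_HORIZONTAL and dy == 0
--                 too_close_vertical = dy < MIN_VERTICAL and dx == 0
--                 too_close_diagonal = dx < MIN_HORIZONTAL and dy < MIN_VERTICAL and dx > 0 and dy > 0
--
--                 if too_close_horizontal or too_close_vertical or too_close_diagonal:
--                     issues.append({
--                         'file': file_path.split('/')[-1],
--                         'node1': f'{name1} [{x1}, {y1}]',
--                         'node2': f'{name2} [{x2}, {y2}]',
--                         'distance': f'dx={dx}, dy={dy}',
--                         'type': 'horizontal' if too_close_horizontal else 'vertical' if too_close_vertical else 'diagonal'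
--                     })
--
--     return issues
-- ===== SOURCE B (Python) =====
-- MIN_HORIZONTAL = 240
--
-- MIN_VERTICAL = 200
--
-- def find_close_nodes(all_positions):
--     # Single streaming pass: each incoming node is compared against the nodes of
--     # its own file seen so far (closeness collapsed to dx<240 and dy<200), and
--     # every issue is bucketed under its anchor (earlier) node, so one final
--     # flatten reproduces the grouped i<j report order without a second grouping
--     # pass or index arithmetic.
--     state = {}  # file -> list of (x, y, name, bucket of issues anchored there)
--     for x2, y2, name2, fp in all_positions:
--         entries = state.get(fp, [])
--         updated = []
--         for x1, y1, name1, bucket in entries: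
--             dx = abs(x2 - x1)
--             dy = abs(y2 - y1)
--             if dx < MIN_HORIZONTAL and dy < MIN_VERTICAL:
--                 bucket = bucket + [{
--                     'file': fp.split('/')[-1],
--                     'node1': f'{name1} [{x1}, {y1}]',
--                     'node2': f'{name2} [{x2}, {y2}]',
--                     'distance': f'dx={dx}, dy={dy}',
--                     'type': 'horizontal' if dy == 0 else 'vertical' if dx == 0 else 'diagonal',
--                 }]
--             updated.append((x1, y1, name1, bucket))
--         state[fp] = updated + [(x2, y2, name2, [])]
--     return [issue for entries in state.values()
--                   for _, _, _, bucket in entries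
--                   for issue in bucket]
-- ===== Notes on version B (the rewrite author's own statement) =====
-- stated objective: alternative
-- what changed: A's group-by-file dict followed by nested indexed all-pairs loops per file is replaced by a single streaming pass that compares each incoming node only against the previously seen nodes of its own file (closeness collapsed to dx<240 and dy<200) and buckets each issue under its anchor node, so one final flatten restores the grouped i<j order without a grouping pass or index arithmetic.
import Mathlib
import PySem

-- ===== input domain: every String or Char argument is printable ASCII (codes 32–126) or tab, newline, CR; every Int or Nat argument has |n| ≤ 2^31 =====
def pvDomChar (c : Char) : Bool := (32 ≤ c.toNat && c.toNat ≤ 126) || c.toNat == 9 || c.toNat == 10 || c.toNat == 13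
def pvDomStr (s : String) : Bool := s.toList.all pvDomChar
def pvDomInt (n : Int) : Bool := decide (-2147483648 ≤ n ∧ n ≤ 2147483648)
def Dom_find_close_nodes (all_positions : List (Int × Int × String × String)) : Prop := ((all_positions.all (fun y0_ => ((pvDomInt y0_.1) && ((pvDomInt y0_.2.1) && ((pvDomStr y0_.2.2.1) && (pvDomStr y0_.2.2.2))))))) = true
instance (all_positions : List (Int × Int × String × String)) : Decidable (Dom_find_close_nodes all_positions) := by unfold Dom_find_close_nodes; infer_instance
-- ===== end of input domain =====

-- B replaces A's group-by-file dict plus nested indexed all-pairs loops by a single streaming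
-- pass that compares each incoming node only against the previously seen nodes of its file
-- (closeness collapsed to dx<240 ∧ dy<200) and buckets each issue under its anchor node, so one
-- final flatten restores A's grouped i<j order (objective: alternative; same asymptotic cost).

def pvMIN_HORIZONTAL : Int := 240

def pvMIN_VERTICAL : Int := 200

-- file_path.split('/')[-1]; total because split with a nonempty separator returns a nonempty
-- list, so the [-1] index never raises (the .getD "" default is unreachable)
def pvSplitLast (s : String) : String :=
  match PySem.Str.split? s "/" with
  | some l => (PySem.List.pyGet? l (-1)).getD ""
  | none => ""

-- ===== PORT A =====
def find_close_nodes (all_positions : List (Int × Int × String × String)) : List (List (String × String)) :=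
  -- files = {}; for pos in all_positions: if pos[3] not in files: files[pos[3]] = []; files[pos[3]].append(pos)
  let files := all_positions.foldl (fun d pos =>
      let fp := pos.2.2.2
      let d := if d.contains fp then d else d.insert fp ([] : List (Int × Int × String × String))
      d.modify fp [] (fun l => l ++ [pos])) PySem.Dict.empty
  -- for file_path, positions in files.items(): nested enumerate loops (inner index j is unused)
  files.items.foldl (fun issues kv =>
    (PySem.List.enumerate kv.2 0).foldl (fun issues ip =>
      (PySem.List.enumerate (PySem.List.slice kv.2 (some (ip.1 + 1)) none) (ip.1 + 1)).foldl (fun issues jp =>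
        let dx : Int := ((jp.2.1 - ip.2.1).natAbs : Int)
        let dy : Int := ((jp.2.2.1 - ip.2.2.1).natAbs : Int)
        let tch := dx < pvMIN_HORIZONTAL ∧ dy = 0
        let tcv := dy < pvMIN_VERTICAL ∧ dx = 0
        let tcd := dx < pvMIN_HORIZONTAL ∧ dy < pvMIN_VERTICAL ∧ dx > 0 ∧ dy > 0
        if tch ∨ tcv ∨ tcd then
          issues ++ [[("file", pvSplitLast kv.1),
                      ("node1", ip.2.2.2.1 ++ " [" ++ PySem.Int.toStr ip.2.1 ++ ", " ++ PySem.Int.toStr ip.2.2.1 ++ "]"),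
                      ("node2", jp.2.2.2.1 ++ " [" ++ PySem.Int.toStr jp.2.1 ++ ", " ++ PySem.Int.toStr jp.2.2.1 ++ "]"),
                      ("distance", "dx=" ++ PySem.Int.toStr dx ++ ", dy=" ++ PySem.Int.toStr dy),
                      ("type", if tch then "horizontal" else if tcv then "vertical" else "diagonal")]]
        else issues) issues) issues) []

-- ===== PORT B =====
-- the issue dict literal B builds (shared shape of every issue B appends)
def pvIssueB (fname name1 : String) (x1 y1 : Int) (name2 : String) (x2 y2 : Int) : List (String × String) :=
  [("file", fname),
   ("node1", name1 ++ " [" ++ PySem.Int.toStr x1 ++ ", " ++ PySem.Int.toStr y1 ++ "]"),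
   ("node2", name2 ++ " [" ++ PySem.Int.toStr x2 ++ ", " ++ PySem.Int.toStr y2 ++ "]"),
   ("distance", "dx=" ++ PySem.Int.toStr ((x2 - x1).natAbs : Int) ++ ", dy=" ++ PySem.Int.toStr ((y2 - y1).natAbs : Int)),
   ("type", if ((y2 - y1).natAbs : Int) = 0 then "horizontal" else if ((x2 - x1).natAbs : Int) = 0 then "vertical" else "diagonal")]

-- one streaming pass: state maps each file to its nodes seen so far, each with the bucket of
-- issues anchored at that node; the comprehension at the end flattens the buckets
def find_close_nodes_alt (all_positions : List (Int × Int × String × String)) : List (List (String × String)) :=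
  let state := all_positions.foldl
    (fun (state : PySem.Dict String (List (Int × Int × String × List (List (String × String))))) pos =>
      let fp := pos.2.2.2
      let entries := state.getD fp []
      let updated := entries.foldl (fun updated e =>
        let dx : Int := ((pos.1 - e.1).natAbs : Int)
        let dy : Int := ((pos.2.1 - e.2.1).natAbs : Int)
        let bucket := if dx < pvMIN_HORIZONTAL ∧ dy < pvMIN_VERTICAL then
            e.2.2.2 ++ [pvIssueB (pvSplitLast fp) e.2.2.1 e.1 e.2.1 pos.2.2.1 pos.1 pos.2.1]
          else e.2.2.2
        updated ++ [(e.1, e.2.1, e.2.2.1, bucket)]) []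
      state.insert fp (updated ++ [(pos.1, pos.2.1, pos.2.2.1, ([] : List (List (String × String))))]))
    PySem.Dict.empty
  state.values.flatMap (fun entries => entries.flatMap (fun e => e.2.2.2))

-- ===== PRECONDITION & SPEC =====
def Spec_find_close_nodes (all_positions : List (Int × Int × String × String)) (out : List (List (String × String))) : Prop := out = find_close_nodes_alt all_positions
instance (all_positions : List (Int × Int × String × String)) (out : List (List (String × String))) : Decidable (Spec_find_close_nodes all_positions out) := by unfold Spec_find_close_nodes; infer_instance

-- ===== CLAIM (what is proved, stated in full; the proofs are below) =====
def Claim_equal_find_close_nodes : Prop := ∀ (all_positions : List (Int × Int × String × String)), Dom_find_close_nodes all_positions → Spec_find_close_nodes all_positions (find_close_nodes all_positions)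

-- ===== LEMMAS AND PROOFS =====

-- the plain upsert fold both grouping phases reduce to
def pvGroup (ap : List (Int × Int × String × String)) : PySem.Dict String (List (Int × Int × String × String)) :=
  ap.foldl (fun d pos => d.insert pos.2.2.2 (d.getD pos.2.2.2 [] ++ [pos])) PySem.Dict.empty

-- the i-major per-file issue list (A's order), defined by suffix recursion
def pvFlat (fname : String) : List (Int × Int × String × String) → List (List (String × String))
  | [] => []
  | p :: rest =>
    ((rest.filter (fun q => decide (((q.1 - p.1).natAbs : Int) < pvMIN_HORIZONTAL ∧ ((q.2.1 - p.2.1).natAbs : Int) < pvMIN_VERTICAL))).map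
      (fun q => pvIssueB fname p.2.2.1 p.1 p.2.1 q.2.2.1 q.1 q.2.1)) ++ pvFlat fname rest

-- a file's nodes annotated with the bucket of issues anchored at each node (B's state value)
def pvAnnot (fname : String) : List (Int × Int × String × String) → List (Int × Int × String × List (List (String × String)))
  | [] => []
  | p :: rest =>
    (p.1, p.2.1, p.2.2.1,
      (rest.filter (fun q => decide (((q.1 - p.1).natAbs : Int) < pvMIN_HORIZONTAL ∧ ((q.2.1 - p.2.1).natAbs : Int) < pvMIN_VERTICAL))).map
        (fun q => pvIssueB fname p.2.2.1 p.1 p.2.1 q.2.2.1 q.1 q.2.1)) :: pvAnnot fname rest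

-- B's per-entry update when node pos arrives
def pvH (fname : String) (pos : Int × Int × String × String)
    (e : Int × Int × String × List (List (String × String))) : Int × Int × String × List (List (String × String)) :=
  (e.1, e.2.1, e.2.2.1,
    if ((pos.1 - e.1).natAbs : Int) < pvMIN_HORIZONTAL ∧ ((pos.2.1 - e.2.1).natAbs : Int) < pvMIN_VERTICAL then
      e.2.2.2 ++ [pvIssueB fname e.2.2.1 e.1 e.2.1 pos.2.2.1 pos.1 pos.2.1]
    else e.2.2.2)

-- the item-list transformation relating A's grouping dict to B's state dict
def pvF (kv : String × List (Int × Int × String × String)) : String × List (Int × Int × String × List (List (String × String))) :=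
  (kv.1, pvAnnot (pvSplitLast kv.1) kv.2)

-- A's grouping step (conditional fresh-[] insert, then append via modify) is the plain upsert
lemma pv_step_eq (d : PySem.Dict String (List (Int × Int × String × String)))
    (pos : Int × Int × String × String) :
    (let fp := pos.2.2.2
     let d' := if d.contains fp then d else d.insert fp ([] : List (Int × Int × String × String))
     d'.modify fp [] (fun l => l ++ [pos])) = d.insert pos.2.2.2 (d.getD pos.2.2.2 [] ++ [pos]) := by
  dsimp only
  by_cases hc : d.contains pos.2.2.2 = true
  · simp only [hc, if_true, PySem.Dict.modify]
  · simp only [hc, Bool.false_eq_true, if_false, PySem.Dict.modify]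
    rw [PySem.Dict.getD_insert_self, PySem.Dict.insert_insert_self,
        PySem.Dict.getD_of_not_contains d _ (by simpa using hc)]

-- the inner-loop bodies agree element-wise (closeness test collapsed, type tag unchanged)
lemma pv_inner_eq (fname : String) (p q : Int × Int × String × String)
    (issues : List (List (String × String))) :
    (let dx : Int := ((q.1 - p.1).natAbs : Int)
     let dy : Int := ((q.2.1 - p.2.1).natAbs : Int)
     let tch := dx < pvMIN_HORIZONTAL ∧ dy = 0
     let tcv := dy < pvMIN_VERTICAL ∧ dx = 0
     let tcd := dx < pvMIN_HORIZONTAL ∧ dy < pvMIN_VERTICAL ∧ dx > 0 ∧ dy > 0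
     if tch ∨ tcv ∨ tcd then
       issues ++ [[("file", fname),
                   ("node1", p.2.2.1 ++ " [" ++ PySem.Int.toStr p.1 ++ ", " ++ PySem.Int.toStr p.2.1 ++ "]"),
                   ("node2", q.2.2.1 ++ " [" ++ PySem.Int.toStr q.1 ++ ", " ++ PySem.Int.toStr q.2.1 ++ "]"),
                   ("distance", "dx=" ++ PySem.Int.toStr dx ++ ", dy=" ++ PySem.Int.toStr dy),
                   ("type", if tch then "horizontal" else if tcv then "vertical" else "diagonal")]]
     else issues)
    = (if ((q.1 - p.1).natAbs : Int) < pvMIN_HORIZONTAL ∧ ((q.2.1 - p.2.1).natAbs : Int) < pvMIN_VERTICAL then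
         issues ++ [pvIssueB fname p.2.2.1 p.1 p.2.1 q.2.2.1 q.1 q.2.1]
       else issues) := by
  dsimp only [pvMIN_HORIZONTAL, pvMIN_VERTICAL, pvIssueB]
  split_ifs <;> first | rfl | (exfalso; omega)

set_option maxRecDepth 8192 in
-- a fold over an enumerate whose index is unused is a fold over the list itself,
-- and the two inner-loop bodies agree element-wise
lemma pv_row_eq (fname : String) (p : Int × Int × String × String)
    (rest : List (Int × Int × String × String)) (a : Int)
    (issues : List (List (String × String))) :
    (PySem.List.enumerate rest a).foldl (fun issues jp =>
        let dx : Int := ((jp.2.1 - p.1).natAbs : Int)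
        let dy : Int := ((jp.2.2.1 - p.2.1).natAbs : Int)
        let tch := dx < pvMIN_HORIZONTAL ∧ dy = 0
        let tcv := dy < pvMIN_VERTICAL ∧ dx = 0
        let tcd := dx < pvMIN_HORIZONTAL ∧ dy < pvMIN_VERTICAL ∧ dx > 0 ∧ dy > 0
        if tch ∨ tcv ∨ tcd then
          issues ++ [[("file", fname),
                      ("node1", p.2.2.1 ++ " [" ++ PySem.Int.toStr p.1 ++ ", " ++ PySem.Int.toStr p.2.1 ++ "]"),
                      ("node2", jp.2.2.2.1 ++ " [" ++ PySem.Int.toStr jp.2.1 ++ ", " ++ PySem.Int.toStr jp.2.2.1 ++ "]"),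
                      ("distance", "dx=" ++ PySem.Int.toStr dx ++ ", dy=" ++ PySem.Int.toStr dy),
                      ("type", if tch then "horizontal" else if tcv then "vertical" else "diagonal")]]
        else issues) issues
    = issues ++ (rest.filter (fun q => decide (((q.1 - p.1).natAbs : Int) < pvMIN_HORIZONTAL ∧ ((q.2.1 - p.2.1).natAbs : Int) < pvMIN_VERTICAL))).map
        (fun q => pvIssueB fname p.2.2.1 p.1 p.2.1 q.2.2.1 q.1 q.2.1) := by
  induction rest generalizing a issues with
  | nil => simp [PySem.List.enumerate_nil]
  | cons q rs ih =>
    rw [PySem.List.enumerate_cons, List.foldl_cons]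
    dsimp only
    rw [pv_inner_eq fname p q issues]
    by_cases h : ((q.1 - p.1).natAbs : Int) < pvMIN_HORIZONTAL ∧ ((q.2.1 - p.2.1).natAbs : Int) < pvMIN_VERTICAL
    · rw [if_pos h, ih, List.filter_cons_of_pos (by simp only [decide_eq_true_eq]; exact h),
          List.map_cons, List.append_assoc]
      rfl
    · rw [if_neg h, ih, List.filter_cons_of_neg (by simp only [decide_eq_true_eq]; exact h)]

set_option maxRecDepth 16384 in
-- A's indexed double loop over one file's positions equals the suffix recursion pvFlat
lemma pv_file_eq (fp : String) (full : List (Int × Int × String × String)) :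
    ∀ (t : List (Int × Int × String × String)) (s : ℕ), full.drop s = t →
    ∀ (issues : List (List (String × String))),
    (PySem.List.enumerate t (s : Int)).foldl (fun issues ip =>
      (PySem.List.enumerate (PySem.List.slice full (some (ip.1 + 1)) none) (ip.1 + 1)).foldl (fun issues jp =>
        let dx : Int := ((jp.2.1 - ip.2.1).natAbs : Int)
        let dy : Int := ((jp.2.2.1 - ip.2.2.1).natAbs : Int)
        let tch := dx < pvMIN_HORIZONTAL ∧ dy = 0
        let tcv := dy < pvMIN_VERTICAL ∧ dx = 0
        let tcd := dx < pvMIN_HORIZONTAL ∧ dy < pvMIN_VERTICAL ∧ dx > 0 ∧ dy > 0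
        if tch ∨ tcv ∨ tcd then
          issues ++ [[("file", pvSplitLast fp),
                      ("node1", ip.2.2.2.1 ++ " [" ++ PySem.Int.toStr ip.2.1 ++ ", " ++ PySem.Int.toStr ip.2.2.1 ++ "]"),
                      ("node2", jp.2.2.2.1 ++ " [" ++ PySem.Int.toStr jp.2.1 ++ ", " ++ PySem.Int.toStr jp.2.2.1 ++ "]"),
                      ("distance", "dx=" ++ PySem.Int.toStr dx ++ ", dy=" ++ PySem.Int.toStr dy),
                      ("type", if tch then "horizontal" else if tcv then "vertical" else "diagonal")]]
        else issues) issues) issues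
    = issues ++ pvFlat (pvSplitLast fp) t := by
  intro t
  induction t with
  | nil => intro s h issues; simp [PySem.List.enumerate_nil, pvFlat]
  | cons p rest ih =>
    intro s h issues
    have hcast : ((s : Int) + 1) = ((s + 1 : ℕ) : Int) := by push_cast; ring
    have hrest : full.drop (s + 1) = rest := by
      have h1 := congrArg (List.drop 1) h
      rw [List.drop_drop] at h1
      simpa [Nat.add_comm] using h1
    rw [PySem.List.enumerate_cons, List.foldl_cons]
    dsimp only
    rw [hcast, PySem.List.slice_from_natCast, hrest, ← hcast, pv_row_eq, hcast,
        ih (s + 1) hrest, pvFlat]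
    rw [List.append_assoc]

set_option maxRecDepth 16384 in
-- A equals the flatMap of pvFlat over the upsert grouping
lemma pv_A_eq (ap : List (Int × Int × String × String)) :
    find_close_nodes ap = (pvGroup ap).items.flatMap (fun kv => pvFlat (pvSplitLast kv.1) kv.2) := by
  unfold find_close_nodes
  dsimp only
  have hg : ap.foldl (fun d pos =>
        let fp := pos.2.2.2
        let d' := if d.contains fp then d else d.insert fp ([] : List (Int × Int × String × String))
        d'.modify fp [] (fun l => l ++ [pos])) PySem.Dict.empty
      = pvGroup ap := by
    apply PySem.List.foldl_congr_mem
    intro d pos _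
    exact pv_step_eq d pos
  rw [hg]
  have hbody : (pvGroup ap).items.foldl (fun issues kv =>
      (PySem.List.enumerate kv.2 0).foldl (fun issues ip =>
        (PySem.List.enumerate (PySem.List.slice kv.2 (some (ip.1 + 1)) none) (ip.1 + 1)).foldl (fun issues jp =>
          let dx : Int := ((jp.2.1 - ip.2.1).natAbs : Int)
          let dy : Int := ((jp.2.2.1 - ip.2.2.1).natAbs : Int)
          let tch := dx < pvMIN_HORIZONTAL ∧ dy = 0
          let tcv := dy < pvMIN_VERTICAL ∧ dx = 0
          let tcd := dx < pvMIN_HORIZONTAL ∧ dy < pvMIN_VERTICAL ∧ dx > 0 ∧ dy > 0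
          if tch ∨ tcv ∨ tcd then
            issues ++ [[("file", pvSplitLast kv.1),
                        ("node1", ip.2.2.2.1 ++ " [" ++ PySem.Int.toStr ip.2.1 ++ ", " ++ PySem.Int.toStr ip.2.2.1 ++ "]"),
                        ("node2", jp.2.2.2.1 ++ " [" ++ PySem.Int.toStr jp.2.1 ++ ", " ++ PySem.Int.toStr jp.2.2.1 ++ "]"),
                        ("distance", "dx=" ++ PySem.Int.toStr dx ++ ", dy=" ++ PySem.Int.toStr dy),
                        ("type", if tch then "horizontal" else if tcv then "vertical" else "diagonal")]]
          else issues) issues) issues) []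
      = (pvGroup ap).items.foldl (fun issues kv => issues ++ pvFlat (pvSplitLast kv.1) kv.2) [] := by
    apply PySem.List.foldl_congr_mem
    intro issues kv _
    have h0 : ((0 : Int)) = ((0 : ℕ) : Int) := by norm_num
    rw [h0]
    exact pv_file_eq kv.1 kv.2 kv.2 0 (by simp) issues
  rw [hbody, PySem.List.foldl_append_eq_flatMap]
  simp

-- get? through the key-preserving value map pvF of the item list
lemma pv_get?_map (L : List (String × List (Int × Int × String × String))) (k : String) :
    (PySem.Dict.mk (L.map pvF)).get? k
      = ((PySem.Dict.mk L).get? k).map (fun v => pvAnnot (pvSplitLast k) v) := by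
  induction L with
  | nil => simp [PySem.Dict.get?]
  | cons kv L ih =>
    rw [List.map_cons]
    rw [show pvF kv = (kv.1, pvAnnot (pvSplitLast kv.1) kv.2) from rfl]
    rw [PySem.Dict.get?_mk_cons, PySem.Dict.get?_mk_cons]
    by_cases h : (kv.1 == k) = true
    · have : kv.1 = k := by simpa using h
      subst this
      simp
    · simp only [h, Bool.false_eq_true, if_false]
      exact ih

-- contains through the key-preserving value map pvF of the item list
lemma pv_contains_map (L : List (String × List (Int × Int × String × String))) (k : String) :
    (PySem.Dict.mk (L.map pvF)).contains k = (PySem.Dict.mk L).contains k := by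
  rw [PySem.Dict.contains_eq_isSome_get?, PySem.Dict.contains_eq_isSome_get?, pv_get?_map]
  cases (PySem.Dict.mk L).get? k <;> rfl

-- B's per-node update of a file's annotated node list appends the new node and
-- extends exactly the buckets of the close earlier nodes
lemma pv_annot_snoc (fname : String) (q : Int × Int × String × String) :
    ∀ (ps : List (Int × Int × String × String)),
    (pvAnnot fname ps).map (pvH fname q) ++ [(q.1, q.2.1, q.2.2.1, ([] : List (List (String × String))))]
      = pvAnnot fname (ps ++ [q]) := by
  intro ps
  induction ps with
  | nil => simp [pvAnnot]
  | cons p ps ih =>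
    rw [List.cons_append, pvAnnot, pvAnnot, List.map_cons, List.cons_append, ← ih]
    simp only [pvH]
    rw [List.filter_append, List.map_append]
    by_cases h : ((q.1 - p.1).natAbs : Int) < pvMIN_HORIZONTAL ∧ ((q.2.1 - p.2.1).natAbs : Int) < pvMIN_VERTICAL
    · rw [if_pos h, List.filter_cons_of_pos (by simp only [decide_eq_true_eq]; exact h),
          List.filter_nil, List.map_cons, List.map_nil]
    · rw [if_neg h, List.filter_cons_of_neg (by simp only [decide_eq_true_eq]; exact h),
          List.filter_nil, List.map_nil, List.append_nil]

-- the streaming fold preserves the item-list relation between A's grouping and B's state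
lemma pv_inv (l : List (Int × Int × String × String)) :
    ∀ (dA : PySem.Dict String (List (Int × Int × String × String)))
      (dB : PySem.Dict String (List (Int × Int × String × List (List (String × String))))),
    dB.items = dA.items.map pvF →
    (l.foldl (fun state pos =>
        state.insert pos.2.2.2 (((state.getD pos.2.2.2 []).map (pvH (pvSplitLast pos.2.2.2) pos)) ++ [(pos.1, pos.2.1, pos.2.2.1, ([] : List (List (String × String))))])) dB).items
      = (l.foldl (fun d pos => d.insert pos.2.2.2 (d.getD pos.2.2.2 [] ++ [pos])) dA).items.map pvF := by
  induction l with
  | nil => intro dA dB h; simpa using h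
  | cons pos l ih =>
    intro dA dB h
    rw [List.foldl_cons, List.foldl_cons]
    apply ih
    -- single-step preservation
    obtain ⟨LB⟩ := dB
    obtain ⟨LA⟩ := dA
    subst h
    have hget : (PySem.Dict.mk (LA.map pvF)).getD pos.2.2.2 []
        = pvAnnot (pvSplitLast pos.2.2.2) ((PySem.Dict.mk LA).getD pos.2.2.2 []) := by
      rw [PySem.Dict.getD_eq_get?_getD, PySem.Dict.getD_eq_get?_getD,
          pv_get?_map LA]
      cases (PySem.Dict.mk LA).get? pos.2.2.2 <;> simp [pvAnnot]
    have hcont : (PySem.Dict.mk (LA.map pvF)).contains pos.2.2.2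
        = (PySem.Dict.mk LA).contains pos.2.2.2 :=
      pv_contains_map LA pos.2.2.2
    rw [hget, pv_annot_snoc]
    by_cases hc : (PySem.Dict.mk LA).contains pos.2.2.2 = true
    · rw [PySem.Dict.items_insert_of_contains _ _ (by rw [hcont]; exact hc),
          PySem.Dict.items_insert_of_contains _ _ hc]
      simp only [List.map_map]
      apply List.map_congr_left
      intro kv _
      by_cases hk : (kv.1 == pos.2.2.2) = true
      · have hk' : kv.1 = pos.2.2.2 := by simpa using hk
        simp [Function.comp, pvF, hk']
      · simp [Function.comp, pvF, hk]
    · rw [PySem.Dict.items_insert_of_not_contains _ _ (by rw [hcont]; exact Bool.eq_false_iff.mpr hc),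
          PySem.Dict.items_insert_of_not_contains _ _ (Bool.eq_false_iff.mpr hc)]
      simp [pvF]

-- the flattened buckets of an annotated node list are exactly its pvFlat issue list
lemma pv_annot_flat (fname : String) :
    ∀ (ps : List (Int × Int × String × String)),
    (pvAnnot fname ps).flatMap (fun e => e.2.2.2) = pvFlat fname ps := by
  intro ps
  induction ps with
  | nil => simp [pvAnnot, pvFlat]
  | cons p ps ih => simp [pvAnnot, pvFlat, ih]

-- B equals the flatMap of pvFlat over the upsert grouping
lemma pv_B_eq (ap : List (Int × Int × String × String)) :
    find_close_nodes_alt ap = (pvGroup ap).items.flatMap (fun kv => pvFlat (pvSplitLast kv.1) kv.2) := by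
  unfold find_close_nodes_alt
  dsimp only
  have hstep : ap.foldl
      (fun (state : PySem.Dict String (List (Int × Int × String × List (List (String × String))))) pos =>
        let fp := pos.2.2.2
        let entries := state.getD fp []
        let updated := entries.foldl (fun updated e =>
          let dx : Int := ((pos.1 - e.1).natAbs : Int)
          let dy : Int := ((pos.2.1 - e.2.1).natAbs : Int)
          let bucket := if dx < pvMIN_HORIZONTAL ∧ dy < pvMIN_VERTICAL then
              e.2.2.2 ++ [pvIssueB (pvSplitLast fp) e.2.2.1 e.1 e.2.1 pos.2.2.1 pos.1 pos.2.1]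
            else e.2.2.2
          updated ++ [(e.1, e.2.1, e.2.2.1, bucket)]) []
        state.insert fp (updated ++ [(pos.1, pos.2.1, pos.2.2.1, ([] : List (List (String × String))))])) PySem.Dict.empty
      = ap.foldl (fun state pos =>
          state.insert pos.2.2.2 (((state.getD pos.2.2.2 []).map (pvH (pvSplitLast pos.2.2.2) pos)) ++ [(pos.1, pos.2.1, pos.2.2.1, ([] : List (List (String × String))))])) PySem.Dict.empty := by
    apply PySem.List.foldl_congr_mem
    intro state pos _
    dsimp only
    congr 1
    congr 1
    exact (PySem.List.foldl_append_singleton_eq_map (pvH (pvSplitLast pos.2.2.2) pos)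
      (state.getD pos.2.2.2 []) []).trans (List.nil_append _)
  rw [hstep]
  have hinv := pv_inv ap (PySem.Dict.empty) (PySem.Dict.empty) (by rfl)
  simp only [PySem.Dict.values]
  rw [hinv]
  have hfin : ∀ (L : List (String × List (Int × Int × String × String))),
      ((L.map pvF).map (fun x => x.2)).flatMap (fun entries => entries.flatMap (fun e => e.2.2.2))
        = L.flatMap (fun kv => pvFlat (pvSplitLast kv.1) kv.2) := by
    intro L
    induction L with
    | nil => rfl
    | cons kv L ih =>
      simp only [List.map_cons, List.flatMap_cons, ih]
      rw [show (pvF kv).2 = pvAnnot (pvSplitLast kv.1) kv.2 from rfl, pv_annot_flat]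
  exact hfin (pvGroup ap).items

-- ===== VERDICT (by name: the statement is the Claim_ definition above) =====
theorem find_close_nodes_spec : Claim_equal_find_close_nodes := by
  intro ap _
  unfold Spec_find_close_nodes
  rw [pv_A_eq, pv_B_eq]
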